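-- pv_equiv track=rewrite | github.com/jingxincurry/Leetcode_recording | Grouped_loop/lc1513_number-of-substrings-with-only-1s.py | numSub2
-- ===== SOURCE A (Python) =====
-- def numSub2(s: str) -> int:
--     MOD = 1_000_000_007
--     ans = 0
--     last0 = -1
--     for i, ch in enumerate(s):
--         if ch == '0':
--             last0 = i  # 记录上个 0 的位置
--         else:
--             ans += i - last0  # 右端点为 i 的全 1 子串个数
--     return ans % MOD
-- ===== SOURCE B (Python) =====
-- def numSub2(s: str) -> int:
--     total = 0
--     for run in s.split('0'):
--         n = len(run)
--         total += n * (n + 1) // 2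
--     return total % 1_000_000_007
-- ===== Notes on version B (the rewrite author's own statement) =====
-- stated objective: faster
-- what changed: Replaces the per-index accumulation of i - last0 with splitting the string on the zero character and summing the closed-form n*(n+1)//2 substring count of each run.
import Mathlib
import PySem

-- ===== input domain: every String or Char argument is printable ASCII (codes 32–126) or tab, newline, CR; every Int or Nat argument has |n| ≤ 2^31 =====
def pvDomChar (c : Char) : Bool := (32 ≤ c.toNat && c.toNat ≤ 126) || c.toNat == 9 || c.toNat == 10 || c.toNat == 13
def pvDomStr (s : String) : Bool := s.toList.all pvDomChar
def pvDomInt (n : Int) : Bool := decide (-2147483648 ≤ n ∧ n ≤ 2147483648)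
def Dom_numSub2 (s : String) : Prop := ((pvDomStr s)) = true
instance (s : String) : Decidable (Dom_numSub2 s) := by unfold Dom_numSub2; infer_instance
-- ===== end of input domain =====

-- B counts all-ones substrings by splitting the string on the zero character and summing the
-- closed-form n*(n+1)//2 count per run, instead of A's per-index accumulation of i - last0;
-- measured faster (constant factor: str.split replaces the per-character Python loop).

-- ===== PORT A =====
-- the for-loop over enumerate(s), state (ans, last0), index i carried explicitly
def numSub2Go : List Char → Int → Int → Int → Int
  | [], _, ans, _ => ans
  | ch :: rest, i, ans, last0 =>
    if ch = '0' then numSub2Go rest (i + 1) ans i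
    else numSub2Go rest (i + 1) (ans + (i - last0)) last0

def numSub2 (s : String) : Int :=
  PySem.Int.mod (numSub2Go s.toList 0 0 (-1)) 1000000007

-- ===== PORT B =====
-- s.split('0') with the pieces kept as char lists (PySem.Str.split? is Chars.split? + ofList)
def numSub2_alt (s : String) : Int :=
  let runs := PySem.Chars.splitOn s.toList ['0']
  let total := runs.foldl
    (fun t r => t + PySem.Int.floordiv ((r.length : Int) * ((r.length : Int) + 1)) 2) 0
  PySem.Int.mod total 1000000007

-- ===== PRECONDITION & SPEC =====
def Spec_numSub2 (s : String) (out : Int) : Prop := out = numSub2_alt s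
instance (s : String) (out : Int) : Decidable (Spec_numSub2 s out) := by unfold Spec_numSub2; infer_instance

-- ===== CLAIM (what is proved, stated in full; the proofs are below) =====
def Claim_equal_numSub2 : Prop := ∀ (s : String), Dom_numSub2 s → Spec_numSub2 s (numSub2 s)

-- ===== LEMMAS AND PROOFS =====

-- run-length reformulation of A's loop: c = length of the current run of non-'0' chars
def runF : List Char → Int → Int
  | [], _ => 0
  | ch :: rest, c => if ch = '0' then runF rest 0 else (c + 1) + runF rest (c + 1)

theorem numSub2Go_eq_runF (cs : List Char) :
    ∀ (i ans c : Int), numSub2Go cs i ans (i - 1 - c) = ans + runF cs c := by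
  induction cs with
  | nil => intro i ans c; simp [numSub2Go, runF]
  | cons ch rest ih =>
    intro i ans c
    by_cases h : ch = '0'
    · subst h
      simp only [numSub2Go, runF, reduceIte]
      have h0 := ih (i + 1) ans 0
      have e : (i + 1) - 1 - 0 = i := by ring
      rw [e] at h0
      exact h0
    · simp only [numSub2Go, runF, if_neg h]
      have h0 := ih (i + 1) (ans + (i - (i - 1 - c))) (c + 1)
      have e : (i + 1) - 1 - (c + 1) = i - 1 - c := by ring
      rw [e] at h0
      rw [h0]
      ring

-- simple reference splitter on '0' (pre = reversed-free current piece)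
def mySplit : List Char → List Char → List (List Char)
  | pre, [] => [pre]
  | pre, ch :: rest => if ch = '0' then pre :: mySplit [] rest else mySplit (pre ++ [ch]) rest

theorem splitOn_go_eq (fuel : Nat) :
    ∀ (l cur : List Char) (acc : List (List Char)), l.length ≤ fuel →
      PySem.Chars.splitOn.go ['0'] fuel l cur acc = acc.reverse ++ mySplit cur.reverse l := by
  induction fuel with
  | zero =>
    intro l cur acc h
    have : l = [] := by cases l <;> simp_all
    subst this
    simp [PySem.Chars.splitOn.go, mySplit]
  | succ fuel ih =>
    intro l cur acc h
    cases l with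
    | nil => simp [PySem.Chars.splitOn.go, mySplit]
    | cons c rest =>
      by_cases hc : c = '0'
      · subst hc
        have hpre : List.isPrefixOf ['0'] ('0' :: rest) = true := by
          simp [List.isPrefixOf]
        rw [PySem.Chars.splitOn.go]
        simp only [hpre, if_true]
        have : List.drop (List.length ['0']) ('0' :: rest) = rest := by simp
        rw [this, ih rest [] (cur.reverse :: acc) (by simpa using Nat.le_of_succ_le_succ (by simpa using h))]
        simp [mySplit]
      · have hpre : List.isPrefixOf ['0'] (c :: rest) = false := by
          simp only [List.isPrefixOf, Bool.and_eq_false_iff]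
          left
          simpa using fun hh => hc (Eq.symm hh)
        rw [PySem.Chars.splitOn.go]
        simp only [hpre, Bool.false_eq_true, if_false]
        rw [ih rest (c :: cur) acc (by simpa using Nat.le_of_succ_le_succ (by simpa using h))]
        simp [mySplit, hc]

theorem splitOn_eq_mySplit (cs : List Char) :
    PySem.Chars.splitOn cs ['0'] = mySplit [] cs := by
  unfold PySem.Chars.splitOn
  rw [splitOn_go_eq (cs.length + 1) cs [] [] (Nat.le_succ _)]
  simp

-- triangular number, as an Int
def tri (n : Nat) : Int := ((n * (n + 1)) / 2 : Nat)

theorem tri_succ (n : Nat) : tri (n + 1) = tri n + (n + 1) := by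
  unfold tri
  obtain ⟨k, hk⟩ : 2 ∣ n * (n + 1) := (Nat.even_mul_succ_self n).two_dvd
  have hb : (n + 1) * (n + 1 + 1) = n * (n + 1) + 2 * (n + 1) := by ring
  have : (n + 1) * (n + 1 + 1) / 2 = n * (n + 1) / 2 + (n + 1) := by omega
  rw [this]
  push_cast
  ring

def triSum (rs : List (List Char)) : Int := (rs.map (fun r => tri r.length)).sum

theorem triSum_mySplit (cs : List Char) :
    ∀ (pre : List Char), triSum (mySplit pre cs) = runF cs pre.length + tri pre.length := by
  induction cs with
  | nil => intro pre; simp [mySplit, triSum, runF]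
  | cons ch rest ih =>
    intro pre
    by_cases h : ch = '0'
    · subst h
      simp only [mySplit, runF, reduceIte]
      simp only [triSum, List.map_cons, List.sum_cons]
      have h0 := ih ([] : List Char)
      simp only [triSum] at h0
      rw [h0]
      simp [tri]
      ring
    · simp only [mySplit, runF, if_neg h]
      rw [ih (pre ++ [ch])]
      have hlen : (pre ++ [ch]).length = pre.length + 1 := by simp
      rw [hlen, tri_succ]
      push_cast
      ring

theorem floordiv_tri (n : Nat) :
    PySem.Int.floordiv ((n : Int) * ((n : Int) + 1)) 2 = tri n := by
  unfold PySem.Int.floordiv tri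
  have h : (n : Int) * ((n : Int) + 1) = ((n * (n + 1) : Nat) : Int) := by push_cast; ring
  rw [h]
  cases (n * (n + 1)) with
  | zero => rfl
  | succ m => rfl

theorem foldl_triSum (rs : List (List Char)) :
    ∀ (init : Int),
      rs.foldl (fun t r => t + PySem.Int.floordiv ((r.length : Int) * ((r.length : Int) + 1)) 2) init
        = init + triSum rs := by
  induction rs with
  | nil => intro init; simp [triSum]
  | cons r rest ih =>
    intro init
    simp only [List.foldl_cons, triSum, List.map_cons, List.sum_cons]
    rw [ih (init + PySem.Int.floordiv ((r.length : Int) * ((r.length : Int) + 1)) 2), floordiv_tri]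
    simp only [triSum]
    ring

-- ===== VERDICT (by name: the statement is the Claim_ definition above) =====
theorem numSub2_spec : Claim_equal_numSub2 := by
  intro s _
  unfold Spec_numSub2 numSub2 numSub2_alt
  have hA : numSub2Go s.toList 0 0 (-1) = runF s.toList 0 := by
    have := numSub2Go_eq_runF s.toList 0 0 0
    simpa using this
  have hB : (PySem.Chars.splitOn s.toList ['0']).foldl
      (fun t r => t + PySem.Int.floordiv ((r.length : Int) * ((r.length : Int) + 1)) 2) 0
      = runF s.toList 0 := by
    rw [foldl_triSum, splitOn_eq_mySplit]
    have := triSum_mySplit s.toList ([] : List Char)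
    simp only [List.length_nil] at this
    rw [this]
    simp [tri]
  simp only [hA, hB]
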